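-- pv_equiv track=rewrite | github.com/nkim505/CS-basics-Problem-and-Solving | Codility/Exercises/Exercise5_ParityDegree.py | solution
-- ===== SOURCE A (Python) =====
-- def solution(N):
--     # write your code in Python 3.6
--
--     result = 0
--
--     # 홀수인 경우
--     if N % 2 != 0:
--         result = -1
--
--     # 소인수분해하기
--     else:
--         count = 0
--         while N % 2 == 0:
--             N = N / 2
--             count += 1
--
--         result = count
--
--     return result
-- ===== SOURCE B (Python) =====
-- def solution(N):
--     # Closed form instead of A's halving loop: for even N the exponent of 2
--     # is the bit length of the lowest set bit, minus 1.
--     if N % 2 != 0: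
--         return -1
--     return (N & -N).bit_length() - 1
-- ===== Notes on version B (the rewrite author's own statement) =====
-- stated objective: simpler
-- what changed: Replaces the while-loop that repeatedly divides N by 2 with a closed-form bit trick: the exponent of 2 dividing N is (N & -N).bit_length() - 1; no loop, for any input.
-- outside the precondition, e.g. on solution(0): A does not finish within the time limit, B returns -1
import Mathlib
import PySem

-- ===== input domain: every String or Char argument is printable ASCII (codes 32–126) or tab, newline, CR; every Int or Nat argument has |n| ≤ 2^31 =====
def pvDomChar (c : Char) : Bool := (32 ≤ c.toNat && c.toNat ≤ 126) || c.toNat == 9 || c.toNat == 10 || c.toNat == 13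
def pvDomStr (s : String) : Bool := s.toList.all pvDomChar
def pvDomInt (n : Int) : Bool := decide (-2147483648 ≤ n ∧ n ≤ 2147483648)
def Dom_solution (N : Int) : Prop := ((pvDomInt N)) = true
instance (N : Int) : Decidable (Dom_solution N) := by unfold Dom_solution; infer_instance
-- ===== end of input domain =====

-- B replaces A's repeated-halving while-loop by the closed-form bit trick
-- (N & -N).bit_length() - 1 for even N (simpler: no loop); A diverges on N = 0
-- (infinite while-loop), so Pre_ excludes 0, where B returns -1.


-- ===== PORT A =====
-- Python's `N = N / 2` is float true division, but inside the loop N is even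
-- (and |N| ≤ 2^31 on Dom), so it equals floor division exactly; ported as
-- floordiv. The while-loop becomes fueled structural recursion; fuel = |N|
-- strictly exceeds the number of iterations (ν₂(N) ≤ log₂|N| < |N|) on every
-- input Pre_ admits, so the fuel guard is never the branch taken.
def solutionLoop : Nat → Int → Int
  | 0, _ => 0
  | fuel+1, n => if PySem.Int.mod n 2 = 0 then solutionLoop fuel (PySem.Int.floordiv n 2) + 1 else 0

def solution (N : Int) : Int :=
  if PySem.Int.mod N 2 ≠ 0 then -1
  else solutionLoop N.natAbs N

-- ===== PORT B =====
def solution_alt (N : Int) : Int :=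
  if PySem.Int.mod N 2 ≠ 0 then -1
  else (PySem.Int.bitLength (PySem.Int.band N (-N)) : Int) - 1

-- ===== PRECONDITION & SPEC =====
-- Pre_ excludes only N = 0, where A's while-loop never terminates (0 % 2 == 0
-- forever); B returns -1 there.
def Pre_solution (N : Int) : Prop := N ≠ 0
instance (N : Int) : Decidable (Pre_solution N) := by unfold Pre_solution; infer_instance
def pvWitness_solution : Int := 12

def Spec_solution (N : Int) (out : Int) : Prop := out = solution_alt N
instance (N : Int) (out : Int) : Decidable (Spec_solution N out) := by unfold Spec_solution; infer_instance

-- ===== CLAIM (what is proved, stated in full; the proofs are below) =====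
def Claim_equal_solution : Prop := ∀ (N : Int), Dom_solution N → Pre_solution N → Spec_solution N (solution N)

-- ===== LEMMAS AND PROOFS =====

-- For odd m, the low bit is the only disagreement between m and m - 1.
lemma land_pred_of_odd (m : Nat) (h : m % 2 = 1) : m &&& (m-1) = m - 1 := by
  apply Nat.eq_of_testBit_eq
  intro i
  cases i with
  | zero => simp [Nat.testBit_zero]; omega
  | succ i =>
    simp only [Nat.testBit_land]; simp only [Nat.testBit_succ]
    have : m / 2 = (m-1)/2 := by omega
    rw [this, Bool.and_self]

-- For even m > 0, m &&& (m-1) halves componentwise.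
lemma land_pred_of_even (m : Nat) (h0 : 0 < m) (h : m % 2 = 0) :
    m &&& (m-1) = 2 * ((m/2) &&& (m/2 - 1)) := by
  apply Nat.eq_of_testBit_eq
  intro i
  cases i with
  | zero =>
    simp [Nat.testBit_zero]
    omega
  | succ i =>
    simp only [Nat.testBit_land]; simp only [Nat.testBit_succ]
    have h1 : (m-1)/2 = m/2 - 1 := by omega
    have h2 : 2 * (m / 2 &&& m / 2 - 1) / 2 = m / 2 &&& m / 2 - 1 := by omega
    rw [h1, h2, Nat.testBit_land]

-- N & -N in the closed form m - (m &&& (m-1)) on m = |N|, for both signs.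
lemma band_neg_self (n : Int) (hn : n ≠ 0) :
    PySem.Int.band n (-n) = ((n.natAbs - (n.natAbs &&& (n.natAbs - 1)) : Nat) : Int) := by
  rcases lt_trichotomy n 0 with h | h | h
  · simp only [PySem.Int.band]
    rw [if_neg (by omega), if_pos (by omega)]
    congr 1
    have h1 : (-n).toNat = n.natAbs := by omega
    have h2 : (-n - 1).toNat = n.natAbs - 1 := by omega
    rw [h1, h2]
  · omega
  · simp only [PySem.Int.band]
    rw [if_pos (by omega), if_neg (by omega)]
    congr 1
    have h1 : n.toNat = n.natAbs := by omega
    have h2 : (-(-n) - 1).toNat = n.natAbs - 1 := by omega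
    rw [h1, h2]

lemma band_neg_self_pos (n : Int) (hn : n ≠ 0) : 0 < PySem.Int.band n (-n) := by
  rw [band_neg_self n hn]
  have h1 : n.natAbs &&& (n.natAbs - 1) ≤ n.natAbs - 1 := Nat.and_le_right
  have h0 : 0 < n.natAbs := by omega
  omega

lemma floordiv_two_of_even (n : Int) :
    PySem.Int.floordiv n 2 = n / 2 := PySem.Int.floordiv_eq_ediv_of_pos (by omega)

-- The loop invariant: with enough fuel, the halving loop computes B's closed form.
lemma loop_eq (fuel : Nat) : ∀ n : Int, n ≠ 0 → n.natAbs ≤ fuel →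
    solutionLoop fuel n = (PySem.Int.bitLength (PySem.Int.band n (-n)) : Int) - 1 := by
  induction fuel with
  | zero => intro n hn hle; omega
  | succ f ih =>
    intro n hn hle
    by_cases hmod : PySem.Int.mod n 2 = 0
    · have hdvd : (2:Int) ∣ n := (PySem.Int.mod_eq_zero_iff_dvd n 2).mp hmod
      obtain ⟨h, rfl⟩ := hdvd
      have hh : h ≠ 0 := by omega
      have hfd : PySem.Int.floordiv (2*h) 2 = h := by
        rw [floordiv_two_of_even]
        exact Int.mul_ediv_cancel_left h (by omega)
      have habs : (2*h).natAbs = 2 * h.natAbs := by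
        simp [Int.natAbs_mul]
      have hle' : h.natAbs ≤ f := by omega
      simp only [solutionLoop, if_pos hmod, hfd]
      rw [ih h hh hle']
      have key : PySem.Int.band (2*h) (-(2*h)) = 2 * PySem.Int.band h (-h) := by
        rw [band_neg_self _ hn, band_neg_self _ hh, habs]
        have hev : (2 * h.natAbs) % 2 = 0 := by omega
        have h0 : 0 < 2 * h.natAbs := by omega
        rw [land_pred_of_even _ h0 hev]
        have hhalf : 2 * h.natAbs / 2 = h.natAbs := by omega
        rw [hhalf]
        push_cast
        have hle2 : h.natAbs &&& (h.natAbs - 1) ≤ h.natAbs - 1 := Nat.and_le_right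
        omega
      rw [key]
      have hpos : 0 < PySem.Int.band h (-h) := band_neg_self_pos h hh
      have hbl : PySem.Int.bitLength (2 * PySem.Int.band h (-h)) =
          PySem.Int.bitLength (PySem.Int.band h (-h)) + 1 := by
        rw [PySem.Int.bitLength_of_pos (by omega)]
        congr 1
        rw [floordiv_two_of_even,
          Int.mul_ediv_cancel_left _ (show (2:Int) ≠ 0 by omega)]
      rw [hbl]
      push_cast
      ring
    · -- n odd: the loop body is never entered and N & -N = 1
      simp only [solutionLoop, if_neg hmod]
      have hodd : n.natAbs % 2 = 1 := by
        rcases Int.emod_two_eq_zero_or_one n with h | h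
        · exfalso; apply hmod
          rw [PySem.Int.mod_eq_zero_iff_dvd]
          exact Int.dvd_of_emod_eq_zero h
        · omega
      have hone : PySem.Int.band n (-n) = 1 := by
        rw [band_neg_self n hn, land_pred_of_odd _ hodd]
        omega
      rw [hone]
      decide

-- ===== VERDICT (by name: the statement is the Claim_ definition above) =====
theorem solution_spec : Claim_equal_solution := by
  intro N _ hN
  unfold Spec_solution solution solution_alt
  by_cases h : PySem.Int.mod N 2 ≠ 0
  · rw [if_pos h, if_pos h]
  · rw [if_neg h, if_neg h]
    exact loop_eq N.natAbs N hN le_rfl
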